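-- pv_equiv track=rewrite | github.com/Nuist666/OverField_Auto_Piano | utils/midi2lrcd.py | group_blocks
-- ===== SOURCE A (Python) =====
-- def group_blocks(blocks):
--     groups = {}
--     for s, e, tok in blocks:
--         key = (s, e)
--         groups.setdefault(key, []).append(tok)
--     out = []
--     for (s, e), toks in groups.items():
--         toks.sort()
--         out.append((s, e, toks))
--     out.sort(key=lambda x: (x[0], x[1]))
--     return out
-- ===== SOURCE B (Python) =====
-- def group_blocks(blocks):
--     keys = sorted({(s, e) for s, e, _ in blocks})
--     return [(s, e, sorted(t for a, b, t in blocks if (a, b) == (s, e))) for s, e in keys]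
-- ===== Notes on version B (the rewrite author's own statement) =====
-- stated objective: simpler
-- what changed: B drops the dict-grouping, the per-group in-place sorts and the final sort of triples: it sorts the distinct (start,end) keys once and builds each group's sorted token list directly by a comprehension over the input.
import Mathlib
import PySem

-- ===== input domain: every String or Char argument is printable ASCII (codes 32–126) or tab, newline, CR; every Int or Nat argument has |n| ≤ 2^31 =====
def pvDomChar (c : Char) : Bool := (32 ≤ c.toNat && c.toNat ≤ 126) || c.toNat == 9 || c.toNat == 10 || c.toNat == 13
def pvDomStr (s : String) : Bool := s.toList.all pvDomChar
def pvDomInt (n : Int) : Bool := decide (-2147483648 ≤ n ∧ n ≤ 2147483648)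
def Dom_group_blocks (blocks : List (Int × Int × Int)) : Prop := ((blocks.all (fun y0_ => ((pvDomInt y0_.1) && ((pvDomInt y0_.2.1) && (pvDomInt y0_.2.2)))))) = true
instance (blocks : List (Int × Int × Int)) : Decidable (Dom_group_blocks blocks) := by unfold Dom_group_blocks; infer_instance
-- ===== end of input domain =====

-- B replaces A's dict-grouping, per-group in-place sorts and final sort of triples by one sort of
-- the distinct (start,end) keys plus a direct per-key comprehension (objective: simpler).

-- ===== PORT A =====
def group_blocks (blocks : List (Int × Int × Int)) : List (Int × Int × List Int) :=
  -- groups.setdefault((s,e), []).append(tok)  ==  modify (s,e) [] (· ++ [tok])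
  let groups : PySem.Dict (Int × Int) (List Int) :=
    blocks.foldl (fun d b => d.modify (b.1, b.2.1) [] (fun l => l ++ [b.2.2])) PySem.Dict.empty
  let out : List (Int × Int × List Int) :=
    groups.items.foldl
      (fun out p => out ++ [(p.1.1, p.1.2, PySem.List.sorted p.2 (fun x => x) false)]) []
  PySem.List.sorted2 out (fun x => x.1) (fun x => x.2.1) false

-- ===== PORT B =====
def group_blocks_alt (blocks : List (Int × Int × Int)) : List (Int × Int × List Int) :=
  let keys : List (Int × Int) :=
    PySem.List.sorted2 (PySem.Set.ofList (blocks.map (fun b => (b.1, b.2.1))))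
      (fun k => k.1) (fun k => k.2) false
  keys.map (fun k => (k.1, k.2,
    PySem.List.sorted ((blocks.filter (fun b => (b.1, b.2.1) == k)).map (fun b => b.2.2))
      (fun x => x) false))

-- ===== PRECONDITION & SPEC =====
def Spec_group_blocks (blocks : List (Int × Int × Int)) (out : List (Int × Int × List Int)) : Prop := out = group_blocks_alt blocks
instance (blocks : List (Int × Int × Int)) (out : List (Int × Int × List Int)) : Decidable (Spec_group_blocks blocks out) := by unfold Spec_group_blocks; infer_instance

-- ===== CLAIM (what is proved, stated in full; the proofs are below) =====
def Claim_equal_group_blocks : Prop := ∀ (blocks : List (Int × Int × Int)), Dom_group_blocks blocks → Spec_group_blocks blocks (group_blocks blocks)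

-- ===== LEMMAS AND PROOFS =====

-- sorted2 with two Int keys is sorted with the lexicographic key
theorem pv_sorted2_as_sorted {α : Type} (xs : List α) (k1 k2 : α → Int) :
    PySem.List.sorted2 xs k1 k2 false
      = PySem.List.sorted xs (fun x => toLex (k1 x, k2 x)) false := by
  rw [PySem.List.sorted_eq_foldl_insertBy]
  show List.foldl (fun acc x => PySem.List.insertBy
      (fun a b => decide (k1 a < k1 b) || !decide (k1 b < k1 a) && decide (k2 a < k2 b)) x acc) [] xs = _
  congr 1
  funext acc x
  congr 1
  funext a b
  rw [Bool.eq_iff_iff]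
  simp only [Bool.or_eq_true, Bool.and_eq_true, Bool.not_eq_true', decide_eq_true_eq,
    decide_eq_false_iff_not, Prod.Lex.lt_iff, ofLex_toLex]
  omega

theorem pv_dict_getD (blocks : List (Int × Int × Int)) (k : Int × Int) :
    (blocks.foldl (fun d b => d.modify (b.1, b.2.1) [] (fun l => l ++ [b.2.2]))
      (PySem.Dict.empty : PySem.Dict (Int × Int) (List Int))).getD k []
    = (blocks.filter (fun b => (b.1, b.2.1) == k)).map (fun b => b.2.2) := by
  have h := PySem.Dict.getD_foldl_modify_append
      (blocks.map (fun b => ((b.1, b.2.1), b.2.2)))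
      (PySem.Dict.empty : PySem.Dict (Int × Int) (List Int)) k
  rw [List.foldl_map] at h
  simpa [List.filter_map, Function.comp, List.map_map] using h

theorem pv_dict_keys (blocks : List (Int × Int × Int)) :
    (blocks.foldl (fun d b => d.modify (b.1, b.2.1) [] (fun l => l ++ [b.2.2]))
      (PySem.Dict.empty : PySem.Dict (Int × Int) (List Int))).keys
    = PySem.Set.ofList (blocks.map (fun b => (b.1, b.2.1))) := by
  have h := PySem.Dict.keys_foldl_modify_key blocks (fun b => (b.1, b.2.1)) []
      (fun _ b => fun l => l ++ [b.2.2])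
      (PySem.Dict.empty : PySem.Dict (Int × Int) (List Int))
  simpa [PySem.Set.update_nil_left] using h

theorem pv_A_eq (blocks : List (Int × Int × Int)) :
    group_blocks blocks
      = PySem.List.sorted
          ((PySem.Set.ofList (blocks.map (fun b => (b.1, b.2.1)))).map
            (fun k => (k.1, k.2,
              PySem.List.sorted ((blocks.filter (fun b => (b.1, b.2.1) == k)).map (fun b => b.2.2))
                (fun x => x) false)))
          (fun x => toLex (x.1, x.2.1)) false := by
  have hnd : (blocks.foldl (fun d b => d.modify (b.1, b.2.1) [] (fun l => l ++ [b.2.2]))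
      (PySem.Dict.empty : PySem.Dict (Int × Int) (List Int))).keys.Nodup := by
    exact PySem.Dict.nodup_keys_foldl_modify_key blocks (fun b => (b.1, b.2.1)) []
      (fun _ b => fun l => l ++ [b.2.2]) _ (by simp [PySem.Dict.keys_empty])
  unfold group_blocks
  simp only []
  rw [PySem.List.foldl_append_singleton_eq_map
      (fun p : (Int × Int) × List Int => (p.1.1, p.1.2, PySem.List.sorted p.2 (fun x => x) false)),
    PySem.Dict.items_eq_map_keys _ hnd [], pv_dict_keys, List.map_map,
    pv_sorted2_as_sorted, List.nil_append]
  congr 1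
  apply List.map_congr_left
  intro k _
  simp [pv_dict_getD]

theorem pv_B_eq (blocks : List (Int × Int × Int)) :
    group_blocks_alt blocks
      = (PySem.List.sorted (PySem.Set.ofList (blocks.map (fun b => (b.1, b.2.1))))
          (fun k => toLex (k.1, k.2)) false).map
          (fun k => (k.1, k.2,
            PySem.List.sorted ((blocks.filter (fun b => (b.1, b.2.1) == k)).map (fun b => b.2.2))
              (fun x => x) false)) := by
  unfold group_blocks_alt
  rw [pv_sorted2_as_sorted]

theorem pv_final (blocks : List (Int × Int × Int)) :
    PySem.List.sorted
        ((PySem.Set.ofList (blocks.map (fun b => (b.1, b.2.1)))).map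
          (fun k => (k.1, k.2,
            PySem.List.sorted ((blocks.filter (fun b => (b.1, b.2.1) == k)).map (fun b => b.2.2))
              (fun x => x) false)))
        (fun x => toLex (x.1, x.2.1)) false
      = (PySem.List.sorted (PySem.Set.ofList (blocks.map (fun b => (b.1, b.2.1))))
          (fun k => toLex (k.1, k.2)) false).map
          (fun k => (k.1, k.2,
            PySem.List.sorted ((blocks.filter (fun b => (b.1, b.2.1) == k)).map (fun b => b.2.2))
              (fun x => x) false)) := by
  set S := PySem.Set.ofList (blocks.map (fun b => (b.1, b.2.1))) with hS
  set F : (Int × Int) → Int × Int × List Int := fun k => (k.1, k.2,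
      PySem.List.sorted ((blocks.filter (fun b => (b.1, b.2.1) == k)).map (fun b => b.2.2))
        (fun x => x) false) with hF
  apply PySem.List.sorted_eq_of_perm_of_pairwise_lt
  · exact (PySem.List.sorted_perm S (fun k => toLex (k.1, k.2)) false).map F
  · rw [List.pairwise_map]
    have hle := PySem.List.sorted_pairwise S (fun k => toLex (k.1, k.2))
    have hnd : (PySem.List.sorted S (fun k => toLex (k.1, k.2)) false).Nodup :=
      (PySem.List.sorted_perm S (fun k => toLex (k.1, k.2)) false).nodup_iff.mpr
        (PySem.Set.nodup_ofList _)
    refine (hle.and hnd).imp ?_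
    rintro a b ⟨h1, h2⟩
    exact lt_of_le_of_ne h1 (fun h => h2 (toLex.injective h))

-- ===== VERDICT (by name: the statement is the Claim_ definition above) =====
theorem group_blocks_spec : Claim_equal_group_blocks := by
  intro blocks _
  unfold Spec_group_blocks
  rw [pv_A_eq, pv_B_eq, pv_final]
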